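-- pv_equiv track=rewrite | github.com/Wmosaic/tilinos-pitos-finos | Validators/Python API/utilFilesPython.py | isNom
-- ===== SOURCE A (Python) =====
-- def isNom(cadena) -> bool:
--     listaStrings = cadena.rsplit()
--     aux = True
--
--     if len(cadena) != 0 and len(listaStrings) != 0:
--         for elementos in listaStrings:
--             if not (elementos.isalpha() or elementos.isspace()):
--                 aux = False
--                 break
--     else:
--         return False
--     return aux
-- ===== SOURCE B (Python) =====
-- def isNom(cadena) -> bool:
--     has_alpha = False
--     for c in cadena:
--         if c.isalpha():
--             has_alpha = True
--         elif not c.isspace():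
--             return False
--     return has_alpha
-- ===== Notes on version B (the rewrite author's own statement) =====
-- stated objective: simpler
-- what changed: B replaces A's split-into-whitespace-tokens pass plus per-token isalpha loop by a single character scan with an early return and a has-alpha flag.
import Mathlib
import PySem

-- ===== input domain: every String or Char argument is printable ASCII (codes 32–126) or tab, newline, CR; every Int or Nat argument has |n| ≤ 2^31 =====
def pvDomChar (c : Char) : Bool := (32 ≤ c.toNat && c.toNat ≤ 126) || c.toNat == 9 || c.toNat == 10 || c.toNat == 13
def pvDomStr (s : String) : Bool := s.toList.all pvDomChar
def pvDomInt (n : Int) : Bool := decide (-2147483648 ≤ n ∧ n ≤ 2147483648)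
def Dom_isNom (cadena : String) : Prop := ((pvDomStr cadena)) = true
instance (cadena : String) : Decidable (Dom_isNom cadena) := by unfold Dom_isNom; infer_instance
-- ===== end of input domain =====

-- B replaces A's split-into-tokens pass and per-token loop by a single character scan (simpler).

-- ===== PORT A =====
-- the 'for elementos in listaStrings' loop with aux and break
def isNomFor : List (List Char) → Bool → Bool
  | [], aux => aux
  | t :: ts, aux =>
    if !(PySem.Chars.strIsalpha t || PySem.Chars.strIsspace t) then false
    else isNomFor ts aux

-- cadena.rsplit() with no arguments equals cadena.split() = PySem.Chars.split₀
def isNom (cadena : String) : Bool :=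
  let listaStrings := PySem.Chars.split₀ cadena.toList
  if PySem.Str.len cadena ≠ 0 ∧ listaStrings.length ≠ 0 then
    isNomFor listaStrings true
  else false

-- ===== PORT B =====
-- the 'for c in cadena' scan with has_alpha and the early 'return False'
def isNomScan : List Char → Bool → Bool
  | [], hasAlpha => hasAlpha
  | c :: cs, hasAlpha =>
    if PySem.Chars.isalpha c then isNomScan cs true
    else if PySem.Chars.isspace c then isNomScan cs hasAlpha
    else false

def isNom_alt (cadena : String) : Bool := isNomScan cadena.toList false

-- ===== PRECONDITION & SPEC =====
def Spec_isNom (cadena : String) (out : Bool) : Prop := out = isNom_alt cadena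
instance (cadena : String) (out : Bool) : Decidable (Spec_isNom cadena out) := by unfold Spec_isNom; infer_instance

-- ===== CLAIM (what is proved, stated in full; the proofs are below) =====
def Claim_equal_isNom : Prop := ∀ (cadena : String), Dom_isNom cadena → Spec_isNom cadena (isNom cadena)

-- ===== LEMMAS AND PROOFS =====

theorem isalpha_of_isspace (c : Char) (h : PySem.Chars.isspace c = true) :
    PySem.Chars.isalpha c = false := by
  have hA : ('A').val.toNat = 65 := rfl
  have hZ : ('Z').val.toNat = 90 := rfl
  have ha : ('a').val.toNat = 97 := rfl
  have hz : ('z').val.toNat = 122 := rfl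
  simp only [PySem.Chars.isspace, PySem.Chars.isalpha, PySem.Chars.isupper, PySem.Chars.islower,
    Char.le_def, Char.toNat, decide_eq_true_eq, Bool.or_eq_true, Bool.and_eq_true,
    Bool.or_eq_false_iff, Bool.and_eq_false_iff, decide_eq_false_iff_not, not_le,
    UInt32.le_iff_toNat_le, hA, hZ, ha, hz] at *
  omega

theorem isNomFor_eq_all (ts : List (List Char)) :
    isNomFor ts true = ts.all (fun t => PySem.Chars.strIsalpha t || PySem.Chars.strIsspace t) := by
  induction ts with
  | nil => rfl
  | cons t ts ih =>
    simp only [isNomFor, List.all_cons]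
    by_cases h : (PySem.Chars.strIsalpha t || PySem.Chars.strIsspace t) = true <;> simp [h, ih]

theorem isNomScan_eq (cs : List Char) (h : Bool) :
    isNomScan cs h =
      (cs.all (fun c => PySem.Chars.isalpha c || PySem.Chars.isspace c)
        && (h || cs.any PySem.Chars.isalpha)) := by
  induction cs generalizing h with
  | nil => simp [isNomScan]
  | cons c cs ih =>
    simp only [isNomScan, List.all_cons, List.any_cons]
    by_cases ha : PySem.Chars.isalpha c = true
    · simp [ha, ih]
    · by_cases hs : PySem.Chars.isspace c = true
      · simp [ha, hs, ih]
      · simp [ha, hs]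

theorem go_flatten (cs : List Char) : ∀ (cur : List Char) (acc : List (List Char)),
    (PySem.Chars.split₀.go cs cur acc).flatten
      = acc.reverse.flatten ++ cur.reverse ++ cs.filter (fun c => !PySem.Chars.isspace c) := by
  induction cs with
  | nil =>
    intro cur acc
    by_cases h : cur.isEmpty <;>
      simp_all [PySem.Chars.split₀.go, List.isEmpty_iff]
  | cons c cs ih =>
    intro cur acc
    by_cases hs : PySem.Chars.isspace c = true
    · by_cases h : cur.isEmpty <;>
        simp_all [PySem.Chars.split₀.go, List.isEmpty_iff]
    · simp_all [PySem.Chars.split₀.go, List.filter_cons]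

theorem go_mem (cs : List Char) : ∀ (cur : List Char) (acc : List (List Char)),
    (∀ t ∈ acc, t ≠ [] ∧ t.all (fun c => !PySem.Chars.isspace c))
    → cur.all (fun c => !PySem.Chars.isspace c)
    → ∀ t ∈ PySem.Chars.split₀.go cs cur acc, t ≠ [] ∧ t.all (fun c => !PySem.Chars.isspace c) := by
  induction cs with
  | nil =>
    intro cur acc hacc hcur t ht
    by_cases h : cur.isEmpty
    · simp only [PySem.Chars.split₀.go, h, if_true, List.mem_reverse] at ht
      exact hacc t ht
    · simp only [PySem.Chars.split₀.go, h, Bool.false_eq_true, if_false, List.reverse_cons,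
        List.mem_append, List.mem_reverse, List.mem_singleton] at ht
      rcases ht with ht | ht
      · exact hacc t ht
      · subst ht
        refine ⟨by simpa [List.isEmpty_iff] using h, by simpa using hcur⟩
  | cons c cs ih =>
    intro cur acc hacc hcur t ht
    by_cases hs : PySem.Chars.isspace c = true
    · by_cases h : cur.isEmpty
      · simp only [PySem.Chars.split₀.go, hs, h, if_true] at ht
        exact ih [] acc hacc (by simp) t ht
      · simp only [PySem.Chars.split₀.go, hs, h, Bool.false_eq_true, if_false, if_true] at ht
        refine ih [] (cur.reverse :: acc) ?_ (by simp) t ht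
        intro u hu
        rcases List.mem_cons.mp hu with rfl | hu
        · refine ⟨by simpa [List.isEmpty_iff] using h, by simpa using hcur⟩
        · exact hacc u hu
    · simp only [PySem.Chars.split₀.go, hs, Bool.false_eq_true, if_false] at ht
      exact ih (c :: cur) acc hacc (by simp_all) t ht

theorem isNom_eq (cadena : String) : isNom cadena = isNom_alt cadena := by
  unfold isNom isNom_alt
  set cs := cadena.toList with hcs
  have hflat : (PySem.Chars.split₀ cs).flatten = cs.filter (fun c => !PySem.Chars.isspace c) := by
    simpa using go_flatten cs [] []
  have hmem : ∀ t ∈ PySem.Chars.split₀ cs, t ≠ [] ∧ t.all (fun c => !PySem.Chars.isspace c) :=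
    go_mem cs [] [] (by simp) (by simp)
  rw [isNomScan_eq]
  set ts := PySem.Chars.split₀ cs with hts
  by_cases hempty : ts.length = 0
  · -- no tokens: all chars are spaces, so no alpha char
    have hfil : cs.filter (fun c => !PySem.Chars.isspace c) = [] := by
      rw [← hflat]; simp [List.length_eq_zero_iff.mp hempty]
    have hspace : ∀ c ∈ cs, PySem.Chars.isspace c = true := by
      intro c hc
      by_contra hns
      have : c ∈ cs.filter (fun c => !PySem.Chars.isspace c) :=
        List.mem_filter.mpr ⟨hc, by simp [Bool.eq_false_iff.mpr hns]⟩
      simp [hfil] at this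
    have hany : cs.any PySem.Chars.isalpha = false := by
      simp only [List.any_eq_false]
      intro c hc
      simp [isalpha_of_isspace c (hspace c hc)]
    simp [hempty, hany]
  · -- some token exists: cs nonempty
    obtain ⟨t, htmem⟩ := List.exists_mem_of_length_pos (by omega : 0 < ts.length)
    obtain ⟨htne, htns⟩ := hmem t htmem
    have hfilne : cs.filter (fun c => !PySem.Chars.isspace c) ≠ [] := by
      rw [← hflat]
      intro h
      exact htne (List.flatten_eq_nil_iff.mp h t htmem)
    have hcsne : cs ≠ [] := by
      intro h; exact hfilne (by simp [h])
    have hlen : PySem.Str.len cadena ≠ 0 := by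
      simp [PySem.Str.len, ← hcs, List.length_eq_zero_iff, hcsne]
    rw [if_pos ⟨hlen, hempty⟩, isNomFor_eq_all]
    -- tokens are nonempty and space-free, so strIsspace is false and strIsalpha is all-alpha
    have hpt : ∀ t ∈ ts, (PySem.Chars.strIsalpha t || PySem.Chars.strIsspace t)
        = t.all PySem.Chars.isalpha := by
      intro t ht
      obtain ⟨hne, hns⟩ := hmem t ht
      have hspF : PySem.Chars.strIsspace t = false := by
        obtain ⟨c, hc⟩ := List.exists_mem_of_ne_nil t hne
        simp only [PySem.Chars.strIsspace]
        have := (List.all_eq_true.mp hns) c hc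
        simp only [Bool.not_eq_true'] at this
        simp only [Bool.and_eq_false_iff]
        right
        exact List.all_eq_false.mpr ⟨c, hc, by simp [this]⟩
      simp [PySem.Chars.strIsalpha, hspF, hne]
    have htok : ts.all (fun t => PySem.Chars.strIsalpha t || PySem.Chars.strIsspace t)
        = ts.all (fun t => t.all PySem.Chars.isalpha) := by
      rw [Bool.eq_iff_iff, List.all_eq_true, List.all_eq_true]
      exact ⟨fun h t ht => (hpt t ht) ▸ h t ht, fun h t ht => (hpt t ht).symm ▸ h t ht⟩
    rw [htok]
    have hall : ts.all (fun t => t.all PySem.Chars.isalpha)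
        = (cs.filter (fun c => !PySem.Chars.isspace c)).all PySem.Chars.isalpha := by
      rw [← hflat, List.all_flatten]
    rw [hall]
    -- now compare filter.all isalpha with cs.all P && cs.any isalpha
    by_cases hgood : (cs.filter (fun c => !PySem.Chars.isspace c)).all PySem.Chars.isalpha = true
    · have hP : cs.all (fun c => PySem.Chars.isalpha c || PySem.Chars.isspace c) = true := by
        simp only [List.all_eq_true] at *
        intro c hc
        by_cases hs : PySem.Chars.isspace c = true
        · simp [hs]
        · simp [hgood c (List.mem_filter.mpr ⟨hc, by simp [hs]⟩)]
      have hany : cs.any PySem.Chars.isalpha = true := by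
        obtain ⟨c, hc⟩ := List.exists_mem_of_ne_nil _ hfilne
        have hcc := List.mem_filter.mp hc
        exact List.any_eq_true.mpr ⟨c, hcc.1, List.all_eq_true.mp hgood c hc⟩
      simp [hgood, hP, hany]
    · have : ∃ c ∈ cs, PySem.Chars.isalpha c = false ∧ PySem.Chars.isspace c = false := by
        simp only [List.all_eq_true, not_forall] at hgood
        obtain ⟨c, hc, hca⟩ := hgood
        have hcc := List.mem_filter.mp hc
        exact ⟨c, hcc.1, by simpa using hca, by simpa using hcc.2⟩
      obtain ⟨c, hc, hca, hcs'⟩ := this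
      have hP : cs.all (fun c => PySem.Chars.isalpha c || PySem.Chars.isspace c) = false := by
        simp only [List.all_eq_false]
        exact ⟨c, hc, by simp [hca, hcs']⟩
      simp only [Bool.eq_false_iff] at *
      simp [hP]
      simpa using hgood

-- ===== VERDICT (by name: the statement is the Claim_ definition above) =====
theorem isNom_spec : Claim_equal_isNom := by
  intro cadena _
  unfold Spec_isNom
  exact isNom_eq cadena
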